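-- pv_equiv track=rewrite | github.com/khrystynaben/khrystyna_ben | programming2.py | generate_new_matrix
-- ===== SOURCE A (Python) =====
-- def generate_new_matrix(matrix):
--     rows, cols = len(matrix), len(matrix[0])
--     new_matrix = [[0 for col in range(cols)] for row in range(rows)]
--     for i in range(rows):
--         for j in range(cols):
--             for k in range(i, rows):
--                 new_matrix[i][j] += matrix[k][j]
--     return new_matrix
-- ===== SOURCE B (Python) =====
-- def generate_new_matrix(matrix):
--     cols = len(matrix[0])
--     acc = [0] * cols
--     out = []
--     for row in reversed(matrix):
--         acc = [a + x for a, x in zip(acc, row)]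
--         out.append(acc)
--     out.reverse()
--     return out
-- ===== Notes on version B (the rewrite author's own statement) =====
-- stated objective: faster
-- what changed: Replaces the triple loop that re-sums each column suffix from scratch with a single bottom-up pass keeping a running row of column sums (each output row is the previous accumulator plus the current row).
import Mathlib
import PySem

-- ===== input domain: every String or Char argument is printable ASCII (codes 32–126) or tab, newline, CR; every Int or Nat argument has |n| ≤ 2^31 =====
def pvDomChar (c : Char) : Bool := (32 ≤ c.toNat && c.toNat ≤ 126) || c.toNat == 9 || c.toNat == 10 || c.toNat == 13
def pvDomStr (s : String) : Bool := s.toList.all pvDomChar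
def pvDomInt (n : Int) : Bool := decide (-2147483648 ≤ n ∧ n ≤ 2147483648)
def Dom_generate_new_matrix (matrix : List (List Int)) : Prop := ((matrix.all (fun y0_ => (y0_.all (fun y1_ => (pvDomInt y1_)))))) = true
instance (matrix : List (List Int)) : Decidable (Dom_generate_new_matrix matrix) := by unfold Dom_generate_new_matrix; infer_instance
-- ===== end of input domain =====

-- B replaces A's triple loop (re-summing each column suffix from scratch) by one bottom-up
-- pass keeping a running row of column sums: asymptotically faster (O(rows*cols) vs O(rows^2*cols)).

-- ===== PORT A =====
-- range(i, rows) is ported as List.range' i (rows - i): identical lists since 0 ≤ i ≤ rows;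
-- matrix[0] as headD (Pre_ excludes the empty matrix, where Python raises IndexError) and
-- matrix[k][j] as getD (Pre_ guarantees k < rows and j < len(matrix[k]) so both are exact).
def generate_new_matrix (matrix : List (List Int)) : List (List Int) :=
  let rows := matrix.length
  let cols := (matrix.headD []).length
  let new0 : List (List Int) := (List.range rows).map (fun _ => (List.range cols).map (fun _ => (0 : Int)))
  (List.range rows).foldl (fun nm i =>
    (List.range cols).foldl (fun nm j =>
      (List.range' i (rows - i)).foldl (fun nm k =>
        nm.set i ((nm.getD i []).set j ((nm.getD i []).getD j 0 + (matrix.getD k []).getD j 0))) nm) nm) new0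

-- ===== PORT B =====
-- reversed-for loop with accumulator = foldl over matrix.reverse; out.append + out.reverse()
-- is realised by consing onto the result list (same final order).
def generate_new_matrix_alt (matrix : List (List Int)) : List (List Int) :=
  let cols := (matrix.headD []).length
  (matrix.reverse.foldl
    (fun (p : List Int × List (List Int)) row =>
      let acc := List.zipWith (· + ·) p.1 row
      (acc, acc :: p.2))
    (List.replicate cols (0 : Int), [])).2

-- ===== PRECONDITION & SPEC =====
-- Pre_ excludes exactly the inputs on which Python A raises IndexError: the empty matrix
-- (matrix[0]) and matrices with some row shorter than the first row (matrix[k][j]).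
def Pre_generate_new_matrix (matrix : List (List Int)) : Prop :=
  matrix ≠ [] ∧ ∀ r ∈ matrix, (matrix.headD []).length ≤ r.length
instance (matrix : List (List Int)) : Decidable (Pre_generate_new_matrix matrix) := by
  unfold Pre_generate_new_matrix; infer_instance

def pvWitness_generate_new_matrix : List (List Int) := [[1, 2], [3, 4]]

def Spec_generate_new_matrix (matrix : List (List Int)) (out : List (List Int)) : Prop := out = generate_new_matrix_alt matrix
instance (matrix : List (List Int)) (out : List (List Int)) : Decidable (Spec_generate_new_matrix matrix out) := by unfold Spec_generate_new_matrix; infer_instance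

-- ===== CLAIM (what is proved, stated in full; the proofs are below) =====
def Claim_equal_generate_new_matrix : Prop := ∀ (matrix : List (List Int)), Dom_generate_new_matrix matrix → Pre_generate_new_matrix matrix → Spec_generate_new_matrix matrix (generate_new_matrix matrix)

-- ===== LEMMAS AND PROOFS =====

-- column sum of an entry, and the per-suffix spec both programs compute
def pvSumCol (j : ℕ) (ms : List (List Int)) : Int := (ms.map (fun r => r.getD j 0)).sum

def pvColsum (c : ℕ) (ms : List (List Int)) : List Int := (List.range c).map (fun j => pvSumCol j ms)

def pvSpecRows (c : ℕ) : List (List Int) → List (List Int)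
  | [] => []
  | r :: rest => pvColsum c (r :: rest) :: pvSpecRows c rest

-- generic: two folds agree when their bodies agree on states satisfying a preserved invariant
theorem pvFoldlCongrInv {σ β : Type} (P : σ → Prop) (f g : σ → β → σ) :
    ∀ (l : List β) (s : σ), P s → (∀ s x, x ∈ l → P s → f s x = g s x) →
      (∀ s x, x ∈ l → P s → P (g s x)) → l.foldl f s = l.foldl g s := by
  intro l
  induction l with
  | nil => intro s _ _ _; rfl
  | cons x xs ih =>
      intro s hP hfg hPg
      simp only [List.foldl_cons]
      rw [hfg s x (by simp) hP]
      exact ih (g s x) (hPg s x (by simp) hP)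
        (fun s y hy hs => hfg s y (by simp [hy]) hs)
        (fun s y hy hs => hPg s y (by simp [hy]) hs)

-- generic: a fold whose body only rewrites slot i acts on that slot alone
theorem pvLrow {α β : Type} (φ : β → α → α) (d : α) (i : ℕ) :
    ∀ (l : List β) (s : List α), i < s.length →
      l.foldl (fun s x => s.set i (φ x (s.getD i d))) s
        = s.set i (l.foldl (fun r x => φ x r) (s.getD i d)) := by
  intro l
  induction l with
  | nil =>
      intro s hi
      simp only [List.foldl_nil]
      rw [List.getD_eq_getElem _ _ hi]
      exact (List.set_getElem_self hi).symm
  | cons x xs ih =>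
      intro s hi
      simp only [List.foldl_cons]
      rw [ih _ (by simpa using hi)]
      rw [List.getD_eq_getElem _ _ (show i < (s.set i (φ x (s.getD i d))).length by simpa using hi),
        List.getElem_set_self (by simpa using hi), List.set_set]

theorem pvGetDSetNe {α : Type} (s : List α) (i t : ℕ) (a d : α) (h : t ≠ i) :
    (s.set i a).getD t d = s.getD t d := by
  simp only [List.getD]
  rw [List.getElem?_set_ne (fun he => h he.symm)]

theorem pvGetDSetSelf {α : Type} (s : List α) (i : ℕ) (a d : α) (h : i < s.length) :
    (s.set i a).getD i d = a := by
  rw [List.getD_eq_getElem _ _ (by simpa using h), List.getElem_set_self (by simpa using h)]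

-- generic: a fold of single-slot rewrites over distinct indices, described slot by slot
theorem pvLG {α : Type} (d : α) (F : ℕ → α → α) (body : List α → ℕ → List α)
    (hb : ∀ (s : List α) (i : ℕ), i < s.length → body s i = s.set i (F i (s.getD i d))) :
    ∀ (l : List ℕ) (s : List α), l.Nodup → (∀ i ∈ l, i < s.length) →
      (l.foldl body s).length = s.length ∧
      ∀ t, (l.foldl body s).getD t d = if t ∈ l then F t (s.getD t d) else s.getD t d := by
  intro l
  induction l with
  | nil => intro s _ _; simp
  | cons i l' ih =>
      intro s hnd hlt
      have hi : i < s.length := hlt i (by simp)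
      obtain ⟨hnd1, hnd2⟩ := List.nodup_cons.mp hnd
      simp only [List.foldl_cons]
      rw [hb s i hi]
      have hlen : (s.set i (F i (s.getD i d))).length = s.length := by simp
      have hih := ih (s.set i (F i (s.getD i d))) hnd2
        (fun t ht => by rw [hlen]; exact hlt t (by simp [ht]))
      refine ⟨by rw [hih.1, hlen], ?_⟩
      intro t
      rw [hih.2 t]
      by_cases htl : t ∈ l'
      · have hti : t ≠ i := fun h => hnd1 (h ▸ htl)
        rw [pvGetDSetNe _ _ _ _ _ hti]
        simp [htl]
      · by_cases hti : t = i
        · subst hti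
          rw [pvGetDSetSelf _ _ _ _ hi]
          simp [htl]
        · rw [pvGetDSetNe _ _ _ _ _ hti]
          simp [htl, hti]

theorem pvKrow (g : ℕ → Int) (j : ℕ) :
    ∀ (lk : List ℕ) (r : List Int), j < r.length →
      lk.foldl (fun r k => r.set j (r.getD j 0 + g k)) r
        = r.set j (r.getD j 0 + (lk.map g).sum) := by
  intro lk
  induction lk with
  | nil =>
      intro r hj
      simp only [List.foldl_nil, List.map_nil, List.sum_nil, add_zero]
      rw [List.getD_eq_getElem _ _ hj]
      exact (List.set_getElem_self hj).symm
  | cons k lk ih =>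
      intro r hj
      simp only [List.foldl_cons, List.map_cons, List.sum_cons]
      rw [ih _ (by simpa using hj), pvGetDSetSelf _ _ _ _ hj, List.set_set, add_assoc]

theorem pvDropSum (f : List Int → Int) (ms : List (List Int)) :
    ∀ (b t : ℕ), t + b = ms.length →
      ((List.range' t b).map (fun k => f (ms.getD k []))).sum = ((ms.drop t).map f).sum := by
  intro b
  induction b with
  | zero =>
      intro t ht
      have : t = ms.length := by omega
      subst this
      simp
  | succ b ih =>
      intro t ht
      have htlt : t < ms.length := by omega
      rw [List.range'_succ, List.drop_eq_getElem_cons htlt]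
      simp only [List.map_cons, List.sum_cons]
      rw [ih (t + 1) (by omega), List.getD_eq_getElem _ _ htlt]

theorem pvSpecRows_length (c : ℕ) (ms : List (List Int)) : (pvSpecRows c ms).length = ms.length := by
  induction ms with
  | nil => rfl
  | cons r rest ih => simp [pvSpecRows, ih]

theorem pvSpecRows_getD (c : ℕ) :
    ∀ (ms : List (List Int)) (t : ℕ), t < ms.length →
      (pvSpecRows c ms).getD t [] = pvColsum c (ms.drop t) := by
  intro ms
  induction ms with
  | nil => intro t ht; simp at ht
  | cons r rest ih =>
      intro t ht
      cases t with
      | zero => simp [pvSpecRows]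
      | succ t => simpa [pvSpecRows] using ih t (by simpa using ht)

theorem pvZipColsum (c : ℕ) (f : ℕ → Int) (r : List Int) (hr : c ≤ r.length) :
    List.zipWith (· + ·) ((List.range c).map f) r = (List.range c).map (fun j => f j + r.getD j 0) := by
  apply List.ext_getElem
  · simp [Nat.min_eq_left hr]
  · intro j h1 h2
    have hj : j < c := by simpa using h2
    simp [List.getElem?_eq_getElem (lt_of_lt_of_le hj hr)]

-- B computes (running column sums, suffix rows) structurally
theorem pvBfoldr (c : ℕ) :
    ∀ (ms : List (List Int)), (∀ r ∈ ms, c ≤ r.length) →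
      ms.foldr (fun row p =>
          (List.zipWith (· + ·) p.1 row, List.zipWith (· + ·) p.1 row :: p.2))
        (List.replicate c (0 : Int), []) = (pvColsum c ms, pvSpecRows c ms) := by
  intro ms
  induction ms with
  | nil =>
      intro _
      simp [pvColsum, pvSumCol, pvSpecRows, List.map_const']
  | cons r rest ih =>
      intro h
      simp only [List.foldr_cons]
      rw [ih (fun r' hr' => h r' (by simp [hr']))]
      have hacc : List.zipWith (· + ·) (pvColsum c rest) r = pvColsum c (r :: rest) := by
        rw [pvColsum, pvZipColsum c _ r (h r (by simp))]
        apply List.map_congr_left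
        intro j _
        simp [pvSumCol, add_comm]
      simp only [hacc]
      rfl

theorem pvB_eq_spec (matrix : List (List Int))
    (h : ∀ r ∈ matrix, (matrix.headD []).length ≤ r.length) :
    generate_new_matrix_alt matrix = pvSpecRows ((matrix.headD []).length) matrix := by
  show (matrix.reverse.foldl
      (fun (p : List Int × List (List Int)) row =>
        (List.zipWith (· + ·) p.1 row, List.zipWith (· + ·) p.1 row :: p.2))
      (List.replicate ((matrix.headD []).length) (0 : Int), [])).2
    = pvSpecRows ((matrix.headD []).length) matrix
  rw [List.foldl_reverse, pvBfoldr _ matrix h]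

-- A-side abbreviations: entry access, the suffix sum A accumulates, the per-row fold
def pvG (matrix : List (List Int)) (j k : ℕ) : Int := (matrix.getD k []).getD j 0

def pvSsum (matrix : List (List Int)) (i j : ℕ) : Int :=
  ((List.range' i (matrix.length - i)).map (pvG matrix j)).sum

def pvRowFun (matrix : List (List Int)) (c i : ℕ) (r : List Int) : List Int :=
  (List.range c).foldl (fun r j =>
    (List.range' i (matrix.length - i)).foldl (fun r k => r.set j (r.getD j 0 + pvG matrix j k)) r) r

-- A's inner two loops at row i rewrite slot i of the matrix by pvRowFun
theorem pvJfold (matrix : List (List Int)) (c i : ℕ) :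
    ∀ (nm : List (List Int)), i < nm.length →
      (List.range c).foldl (fun nm j =>
        (List.range' i (matrix.length - i)).foldl (fun nm k =>
          nm.set i ((nm.getD i []).set j ((nm.getD i []).getD j 0 + pvG matrix j k))) nm) nm
      = nm.set i (pvRowFun matrix c i (nm.getD i [])) := by
  intro nm hi
  have hcg := pvFoldlCongrInv (fun nm : List (List Int) => i < nm.length)
    (fun nm j =>
      (List.range' i (matrix.length - i)).foldl (fun nm k =>
        nm.set i ((nm.getD i []).set j ((nm.getD i []).getD j 0 + pvG matrix j k))) nm)
    (fun nm j => nm.set i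
      ((List.range' i (matrix.length - i)).foldl
        (fun r k => r.set j (r.getD j 0 + pvG matrix j k)) (nm.getD i [])))
    (List.range c) nm hi
    (fun s j _ hs =>
      pvLrow (fun k r => r.set j (r.getD j 0 + pvG matrix j k)) [] i
        (List.range' i (matrix.length - i)) s hs)
    (fun s j _ hs => by simpa using hs)
  rw [hcg]
  exact pvLrow (fun j r =>
      (List.range' i (matrix.length - i)).foldl
        (fun r k => r.set j (r.getD j 0 + pvG matrix j k)) r)
    [] i (List.range c) nm hi

-- applied to the all-zero row, the per-row fold yields the row of suffix sums
theorem pvRowFun_z (matrix : List (List Int)) (c i : ℕ) :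
    pvRowFun matrix c i ((List.range c).map (fun _ => (0 : Int)))
      = (List.range c).map (fun j => pvSsum matrix i j) := by
  have hcg := pvFoldlCongrInv (fun r : List Int => r.length = c)
    (fun r j =>
      (List.range' i (matrix.length - i)).foldl (fun r k => r.set j (r.getD j 0 + pvG matrix j k)) r)
    (fun r j => r.set j (r.getD j 0 + pvSsum matrix i j))
    (List.range c) ((List.range c).map (fun _ => (0 : Int))) (by simp)
    (fun r j hj hr =>
      pvKrow (pvG matrix j) j (List.range' i (matrix.length - i)) r
        (by rw [hr]; exact List.mem_range.mp hj))
    (fun r j _ hr => by simp [hr])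
  rw [pvRowFun, hcg]
  have hlg := pvLG (0 : Int) (fun j v => v + pvSsum matrix i j)
    (fun s j => s.set j (s.getD j 0 + pvSsum matrix i j)) (fun _ _ _ => rfl)
    (List.range c) ((List.range c).map (fun _ => (0 : Int))) (List.nodup_range)
    (by simp)
  apply List.ext_getElem
  · rw [hlg.1]; simp
  · intro t h1 h2
    have ht : t < c := by simpa using h2
    rw [← List.getD_eq_getElem _ 0 h1, hlg.2 t]
    have hz : ((List.range c).map (fun _ => (0 : Int))).getD t 0 = 0 := by
      rw [List.getD_eq_getElem _ _ (by simpa using ht)]; simp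
    simp [List.mem_range.mpr ht]

theorem pvA_eq_spec (matrix : List (List Int)) :
    generate_new_matrix matrix = pvSpecRows ((matrix.headD []).length) matrix := by
  show ((List.range matrix.length).foldl (fun nm i =>
      (List.range ((matrix.headD []).length)).foldl (fun nm j =>
        (List.range' i (matrix.length - i)).foldl (fun nm k =>
          nm.set i ((nm.getD i []).set j ((nm.getD i []).getD j 0 + pvG matrix j k))) nm) nm)
      ((List.range matrix.length).map (fun _ =>
        (List.range ((matrix.headD []).length)).map (fun _ => (0 : Int)))))
    = pvSpecRows ((matrix.headD []).length) matrix
  have hmain := pvLG ([] : List Int) (pvRowFun matrix ((matrix.headD []).length))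
    (fun nm i =>
      (List.range ((matrix.headD []).length)).foldl (fun nm j =>
        (List.range' i (matrix.length - i)).foldl (fun nm k =>
          nm.set i ((nm.getD i []).set j ((nm.getD i []).getD j 0 + pvG matrix j k))) nm) nm)
    (fun s i hi => pvJfold matrix ((matrix.headD []).length) i s hi)
    (List.range matrix.length)
    ((List.range matrix.length).map (fun _ =>
      (List.range ((matrix.headD []).length)).map (fun _ => (0 : Int))))
    (List.nodup_range) (by simp)
  apply List.ext_getElem
  · rw [hmain.1]; simp [pvSpecRows_length]
  · intro t h1 h2
    have ht : t < matrix.length := by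
      have := h2; rwa [pvSpecRows_length] at this
    rw [← List.getD_eq_getElem _ [] h1, hmain.2 t]
    simp only [List.mem_range.mpr ht, if_pos]
    have hz : ((List.range matrix.length).map (fun _ =>
        (List.range ((matrix.headD []).length)).map (fun _ => (0 : Int)))).getD t []
        = (List.range ((matrix.headD []).length)).map (fun _ => (0 : Int)) := by
      rw [List.getD_eq_getElem _ _ (by simpa using ht)]; simp
    rw [hz, pvRowFun_z, ← List.getD_eq_getElem _ [] h2, pvSpecRows_getD _ matrix t ht]
    unfold pvColsum
    apply List.map_congr_left
    intro j _
    have hds : (List.map (pvG matrix j) (List.range' t (matrix.length - t))).sum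
        = ((matrix.drop t).map (fun r => r.getD j 0)).sum := by
      rw [← pvDropSum (fun r => r.getD j 0) matrix (matrix.length - t) t (by omega)]
      rfl
    rw [pvSsum, hds]
    rfl

-- ===== VERDICT (by name: the statement is the Claim_ definition above) =====
theorem generate_new_matrix_spec : Claim_equal_generate_new_matrix := by
  intro matrix _ hpre
  unfold Spec_generate_new_matrix
  rw [pvA_eq_spec matrix, pvB_eq_spec matrix hpre.2]
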